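-- pv_equiv track=rewrite | github.com/zjzaitzeff/Super-Synonymous-Scoring-Suite | pipeline/find_codon_efficiency.py | get_codons
-- ===== SOURCE A (Python) =====
-- def get_codons(fasta_dict):
--     codon_dict = {}
--     for seq_id, seq in fasta_dict.items():
--         seq = seq.upper().replace("\n", "").replace(" ", "")
--         codons = []
--         for i in range(0, len(seq) - 2, 3):
--             codon = seq[i:i+3]
--             if len(codon) == 3:
--                 codons.append(codon)
--         codon_dict[seq_id] = codons
--     return codon_dict
-- ===== SOURCE B (Python) =====
-- def get_codons(fasta_dict):
--     codon_dict = {}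
--     for seq_id, seq in fasta_dict.items():
--         s = seq.upper().replace("\n", "").replace(" ", "")
--         it = iter(s)
--         codon_dict[seq_id] = [a + b + c for a, b, c in zip(it, it, it)]
--     return codon_dict
-- ===== Notes on version B (the rewrite author's own statement) =====
-- stated objective: idiomatic
-- what changed: The indexed slicing loop with a length guard is replaced by the standard iterator-zip chunking idiom (zip(it, it, it)), which consumes the normalized string three characters at a time and drops a trailing remainder with no index arithmetic.
import Mathlib
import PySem

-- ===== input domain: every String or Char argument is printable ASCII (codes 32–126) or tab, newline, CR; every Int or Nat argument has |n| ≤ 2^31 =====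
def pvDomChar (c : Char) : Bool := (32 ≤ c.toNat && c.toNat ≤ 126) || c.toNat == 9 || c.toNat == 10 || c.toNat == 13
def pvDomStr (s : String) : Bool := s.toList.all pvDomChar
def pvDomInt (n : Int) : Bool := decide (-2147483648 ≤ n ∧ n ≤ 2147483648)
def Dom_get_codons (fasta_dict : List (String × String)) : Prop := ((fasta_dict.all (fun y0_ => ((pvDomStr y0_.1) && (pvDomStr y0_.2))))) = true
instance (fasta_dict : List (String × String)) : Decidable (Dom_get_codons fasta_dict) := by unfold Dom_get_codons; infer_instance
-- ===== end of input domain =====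

-- B replaces A's indexed slicing loop by the iterator-zip chunking idiom; return values proved equal.

-- ===== PORT A =====
-- seq.upper().replace("\n", "").replace(" ", "") on the code-point list (exact via PySem.Chars)
def normA (seq : String) : List Char :=
  PySem.Chars.replace (PySem.Chars.replace (PySem.Chars.upper seq.toList) ['\n'] []) [' '] []

-- the inner 'for i in range(0, len(seq) - 2, 3)' loop of A
def loopA (cs : List Char) : List String :=
  (PySem.List.pyRange 0 ((cs.length : Int) - 2) 3).foldl
    (fun acc i =>
      let codon := PySem.List.slice cs (some i) (some (i + 3))
      if codon.length == 3 then acc ++ [String.ofList codon] else acc) []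

def get_codons (fasta_dict : List (String × String)) : List (String × List String) :=
  fasta_dict.foldl (fun d p => PySem.Dict.insert d p.1 (loopA (normA p.2)))
    (PySem.Dict.empty : PySem.Dict String (List String)) |>.items

-- ===== PORT B =====
-- '[a + b + c for a, b, c in zip(it, it, it)]': consume three characters at a time
def chunk3 : List Char → List String
  | a :: b :: c :: rest => String.ofList [a, b, c] :: chunk3 rest
  | _ => []

def normB (seq : String) : List Char :=
  (PySem.Str.replace (PySem.Str.replace (PySem.Str.upper seq) "\n" "") " " "").toList

def get_codons_alt (fasta_dict : List (String × String)) : List (String × List String) :=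
  fasta_dict.foldl (fun d p => PySem.Dict.insert d p.1 (chunk3 (normB p.2)))
    (PySem.Dict.empty : PySem.Dict String (List String)) |>.items

-- ===== PRECONDITION & SPEC =====
def Spec_get_codons (fasta_dict : List (String × String)) (out : List (String × List String)) : Prop := out = get_codons_alt fasta_dict
instance (fasta_dict : List (String × String)) (out : List (String × List String)) : Decidable (Spec_get_codons fasta_dict out) := by unfold Spec_get_codons; infer_instance

-- ===== CLAIM (what is proved, stated in full; the proofs are below) =====
def Claim_equal_get_codons : Prop := ∀ (fasta_dict : List (String × String)), Dom_get_codons fasta_dict → Spec_get_codons fasta_dict (get_codons fasta_dict)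

-- ===== LEMMAS AND PROOFS =====

theorem normB_eq_normA (seq : String) : normB seq = normA seq := by
  simp only [normB, normA, PySem.Str.toList_replace, PySem.Str.toList_upper]
  rfl

-- range(0, m+1, 3) splits off 0 and shifts
theorem pyRange_three_shift (m : Nat) :
    PySem.List.pyRange 0 ((m : Int) + 1) 3 =
      0 :: (PySem.List.pyRange 0 ((m : Int) - 2) 3).map (· + 3) := by
  rw [PySem.List.pyRange_of_pos _ _ (by norm_num : (0:Int) < 3),
      PySem.List.pyRange_of_pos _ _ (by norm_num : (0:Int) < 3)]
  have h1 : (if (0:Int) < (m:Int) + 1 then (((m:Int) + 1 - 0 + 3 - 1)/3).toNat else 0)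
      = (if (0:Int) < (m:Int) - 2 then (((m:Int) - 2 - 0 + 3 - 1)/3).toNat else 0) + 1 := by
    split_ifs <;> omega
  rw [h1, List.range_succ_eq_map, List.map_cons, List.map_map, List.map_map]
  refine congrArg₂ List.cons (by norm_num) ?_
  refine List.map_congr_left fun k _ => ?_
  simp only [Function.comp_apply]
  push_cast
  ring

theorem loopA_aux (cs : List Char) (acc : List String) :
    (PySem.List.pyRange 0 ((cs.length : Int) - 2) 3).foldl
      (fun acc i =>
        let codon := PySem.List.slice cs (some i) (some (i + 3))
        if codon.length == 3 then acc ++ [String.ofList codon] else acc) acc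
    = acc ++ chunk3 cs := by
  induction cs using chunk3.induct generalizing acc with
  | case1 a b c rest ih =>
      have hlen : (((a :: b :: c :: rest).length : Int)) - 2 = (rest.length : Int) + 1 := by
        simp
        ring
      rw [hlen, pyRange_three_shift rest.length, List.foldl_cons, List.foldl_map]
      have h0 : PySem.List.slice (a :: b :: c :: rest) (some 0) (some (0 + 3)) = [a, b, c] := by
        have : ((0:Int)) = ((0:Nat):Int) := by norm_num
        rw [this]
        have : ((0:Nat):Int) + 3 = ((0:Nat):Int) + ((3:Nat):Int) := by norm_num
        rw [this, PySem.List.slice_natCast_add]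
        rfl
      simp only [h0]
      norm_num
      rw [PySem.List.foldl_congr_mem _ _
        (fun acc2 i =>
          let codon := PySem.List.slice rest (some i) (some (i + 3))
          if codon.length == 3 then acc2 ++ [String.ofList codon] else acc2) _ ?_]
      · rw [ih (acc ++ [String.ofList [a, b, c]])]
        simp [chunk3]
      · intro acc2 x hx
        obtain ⟨hx0, -, -⟩ := (PySem.List.mem_pyRange_iff_of_pos (by norm_num : (0:Int) < 3) x).mp hx
        obtain ⟨j, rfl⟩ : ∃ j : Nat, x = (j : Int) := ⟨x.toNat, (Int.toNat_of_nonneg hx0).symm⟩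
        have e1 : (j : Int) + 3 = ((j + 3 : Nat) : Int) := by push_cast; ring
        have e2 : ((j + 3 : Nat) : Int) + 3 = ((j + 3 : Nat) : Int) + ((3:Nat) : Int) := by norm_num
        have e4 : List.drop (j + 3) (a :: b :: c :: rest) = List.drop j rest := rfl
        simp only [e1, e2, PySem.List.slice_natCast_add, e4, PySem.List.slice_natCast]
        simp
  | case2 t h =>
      rcases t with - | ⟨x, - | ⟨y, - | ⟨z, r⟩⟩⟩
      · rw [show ((([]:List Char).length : Int)) - 2 = -2 by norm_num,
            PySem.List.pyRange_of_pos _ _ (by norm_num : (0:Int) < 3)]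
        simp [chunk3]
      · rw [show ((([x]:List Char).length : Int)) - 2 = -1 by norm_num,
            PySem.List.pyRange_of_pos _ _ (by norm_num : (0:Int) < 3)]
        simp [chunk3]
      · rw [show ((([x,y]:List Char).length : Int)) - 2 = 0 by norm_num,
            PySem.List.pyRange_of_pos _ _ (by norm_num : (0:Int) < 3)]
        simp [chunk3]
      · exact absurd rfl (h x y z r)

theorem loopA_eq_chunk3 (cs : List Char) : loopA cs = chunk3 cs := by
  simpa [loopA] using loopA_aux cs []

-- ===== VERDICT (by name: the statement is the Claim_ definition above) =====
theorem get_codons_spec : Claim_equal_get_codons := by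
  intro fd _
  unfold Spec_get_codons get_codons get_codons_alt
  have h : (fun (d : PySem.Dict String (List String)) (p : String × String) =>
        PySem.Dict.insert d p.1 (loopA (normA p.2)))
      = (fun d p => PySem.Dict.insert d p.1 (chunk3 (normB p.2))) := by
    funext d p
    rw [loopA_eq_chunk3, normB_eq_normA]
  rw [h]
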